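-- pv_equiv track=rewrite | github.com/roman-strilets/beam-node-sync | src/deserializers/block.py | _find_mainnet_fork_index
-- ===== SOURCE A (Python) =====
-- MAINNET_FORK_HEIGHTS = (0, 321321, 777777, 1280000, 1820000, 1920000)
--
-- def _find_mainnet_fork_index(height: int) -> int:
--     index = 0
--     for candidate, fork_height in enumerate(MAINNET_FORK_HEIGHTS):
--         if height >= fork_height:
--             index = candidate
--         else:
--             break
--     return index
-- ===== SOURCE B (Python) =====
-- MAINNET_FORK_HEIGHTS = (0, 321321, 777777, 1280000, 1820000, 1920000)
--
-- def _find_mainnet_fork_index(height: int) -> int: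
--     # The tuple is strictly ascending with first entry 0, so the last index whose
--     # fork height is <= height equals the number of later fork heights reached.
--     return sum(1 for fh in MAINNET_FORK_HEIGHTS[1:] if height >= fh)
-- ===== Notes on version B (the rewrite author's own statement) =====
-- stated objective: simpler
-- what changed: Replaces the stateful scan-with-break by a closed-form count: since the fork-height tuple is strictly ascending and starts at 0, the answer is the number of tail fork heights that are <= height.
import Mathlib
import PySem

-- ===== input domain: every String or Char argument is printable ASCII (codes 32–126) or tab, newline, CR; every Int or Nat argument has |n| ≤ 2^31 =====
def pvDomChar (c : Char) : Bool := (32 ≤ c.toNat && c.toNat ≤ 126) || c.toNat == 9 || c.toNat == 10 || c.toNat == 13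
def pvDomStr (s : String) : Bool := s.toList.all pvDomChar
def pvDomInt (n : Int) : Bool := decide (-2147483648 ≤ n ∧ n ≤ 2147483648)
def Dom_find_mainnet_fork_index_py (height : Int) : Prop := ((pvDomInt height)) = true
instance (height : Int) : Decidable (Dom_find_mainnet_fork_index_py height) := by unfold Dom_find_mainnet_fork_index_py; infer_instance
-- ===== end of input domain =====

-- B replaces A's scan-with-break by counting the tail fork heights <= height (simpler, same cost).


-- ===== PORT A =====
-- Beam mainnet fork heights (tuple constant from the module)
def pvForkHeights : List Int := [0, 321321, 777777, 1280000, 1820000, 1920000]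

-- A's loop over enumerate(...) with break: recursion over the (index, fork_height) pairs
def pvALoop (height : Int) : List (Int × Int) → Int → Int
  | [], index => index
  | (candidate, fork_height) :: rest, index =>
      if height ≥ fork_height then pvALoop height rest candidate else index

def find_mainnet_fork_index_py (height : Int) : Int :=
  pvALoop height (PySem.List.enumerate pvForkHeights) 0

-- ===== PORT B =====
-- B: count the tail fork heights already reached (tuple is strictly ascending, starts at 0)
def find_mainnet_fork_index_py_alt (height : Int) : Int :=
  ((pvForkHeights.drop 1).countP (fun fh => height ≥ fh) : Nat)

-- ===== PRECONDITION & SPEC =====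
def Spec_find_mainnet_fork_index_py (height : Int) (out : Int) : Prop := out = find_mainnet_fork_index_py_alt height
instance (height : Int) (out : Int) : Decidable (Spec_find_mainnet_fork_index_py height out) := by unfold Spec_find_mainnet_fork_index_py; infer_instance

-- ===== CLAIM (what is proved, stated in full; the proofs are below) =====
def Claim_equal_find_mainnet_fork_index_py : Prop := ∀ (height : Int), Dom_find_mainnet_fork_index_py height → Spec_find_mainnet_fork_index_py height (find_mainnet_fork_index_py height)

-- ===== LEMMAS AND PROOFS =====

-- ===== VERDICT (by name: the statement is the Claim_ definition above) =====
theorem find_mainnet_fork_index_py_spec : Claim_equal_find_mainnet_fork_index_py := by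
  intro height _
  unfold Spec_find_mainnet_fork_index_py find_mainnet_fork_index_py find_mainnet_fork_index_py_alt
  simp only [pvForkHeights, PySem.List.enumerate_cons, PySem.List.enumerate_nil,
    List.drop, List.countP, List.countP.go, pvALoop, Bool.cond_decide]
  split_ifs <;> simp_all <;> omega
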